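-- pv_equiv track=rewrite | github.com/NorthDice/AgentCLI | agentcli/core/patch_engine.py | _insert_before
-- ===== SOURCE A (Python) =====
-- from typing import Dict, List, Any, Optional, Tuple
--
-- def _insert_before(content: str, patch_def: Dict[str, Any]) -> str:
--     """Insert content before target."""
--     lines = content.split('\n')
--     target = patch_def['target']
--     new_content = patch_def['content']
--
--     for i, line in enumerate(lines):
--         if target in line:
--             lines.insert(i, new_content)
--             break
--
--     return '\n'.join(lines)
-- ===== SOURCE B (Python) =====
-- def _insert_before(content: str, patch_def) -> str:
--     """Insert content before the first line containing target, by offset arithmetic."""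
--     target = patch_def['target']
--     new_content = patch_def['content']
--     idx = content.find(target)
--     if idx == -1 or '\n' in target:
--         # no line of content can contain target
--         return content
--     line_start = content.rfind('\n', 0, idx) + 1
--     return content[:line_start] + new_content + '\n' + content[line_start:]
-- ===== Notes on version B (the rewrite author's own statement) =====
-- stated objective: alternative
-- what changed: B never splits the string into a list of lines: it locates the first occurrence of target with content.find, backs up to the start of that line with content.rfind('\n', 0, idx), and splices new_content in by slicing the original string at that offset (guarding the target-contains-newline case, where no line can match and the content is returned unchanged).
import Mathlib
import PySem

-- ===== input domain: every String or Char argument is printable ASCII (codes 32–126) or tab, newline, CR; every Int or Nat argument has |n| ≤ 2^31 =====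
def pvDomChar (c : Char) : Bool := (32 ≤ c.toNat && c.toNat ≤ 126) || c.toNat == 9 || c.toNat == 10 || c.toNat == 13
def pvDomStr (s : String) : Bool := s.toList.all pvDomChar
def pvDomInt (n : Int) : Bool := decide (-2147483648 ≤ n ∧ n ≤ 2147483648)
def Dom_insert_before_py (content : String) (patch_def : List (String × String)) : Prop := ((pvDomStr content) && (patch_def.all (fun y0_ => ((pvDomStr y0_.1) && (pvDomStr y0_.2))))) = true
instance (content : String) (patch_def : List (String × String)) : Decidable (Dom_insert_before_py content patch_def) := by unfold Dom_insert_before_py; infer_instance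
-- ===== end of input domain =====

-- B replaces A's split-into-lines / scan / insert / join pipeline by pure offset
-- arithmetic on the original string (find + rfind + two slices); same return value.

-- ===== PORT A =====
-- the 'for i, line in enumerate(lines): if target in line: lines.insert(i, new_content); break' loop:
-- scan the lines in order, put new_content before the first line containing target
def pvInsLoop (target new_content : String) : List String → List String
  | [] => []
  | l :: rest =>
      if PySem.Str.isIn target l then new_content :: l :: rest
      else l :: pvInsLoop target new_content rest

def insert_before_py (content : String) (patch_def : List (String × String)) : String :=
  let lines : List String := (PySem.Str.split? content "\n").getD []   -- sep "\n" ≠ "": never none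
  let d := PySem.Dict.ofList patch_def
  match d.get? "target", d.get? "content" with
  | some target, some new_content =>
      PySem.Str.join "\n" (pvInsLoop target new_content lines)
  | _, _ => ""   -- Python raises KeyError here; excluded by Pre_

-- ===== PORT B =====
def insert_before_py_alt (content : String) (patch_def : List (String × String)) : String :=
  let d := PySem.Dict.ofList patch_def
  match d.get? "target" with
  | none => ""   -- Python raises KeyError here; excluded by Pre_
  | some target =>
    match d.get? "content" with
    | none => ""   -- Python raises KeyError here; excluded by Pre_
    | some new_content =>
        let idx := PySem.Str.find content target
        if idx = -1 ∨ PySem.Str.isIn "\n" target then content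
        else
          let lineStart := PySem.Str.rfindFrom content "\n" 0 (some idx) + 1
          -- content[:lineStart] + new_content + "\n" + content[lineStart:]
          String.ofList (PySem.List.slice content.toList none (some lineStart)
            ++ new_content.toList ++ '\n' :: PySem.List.slice content.toList (some lineStart) none)

-- ===== PRECONDITION & SPEC =====
-- Pre_ excludes only the dicts missing key 'target' or 'content', on which Python A raises KeyError.
def Pre_insert_before_py (content : String) (patch_def : List (String × String)) : Prop :=
  ((PySem.Dict.ofList patch_def).get? "target").isSome = true ∧
  ((PySem.Dict.ofList patch_def).get? "content").isSome = true
instance (content : String) (patch_def : List (String × String)) : Decidable (Pre_insert_before_py content patch_def) := by unfold Pre_insert_before_py; infer_instance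

def pvWitness_insert_before_py : String × (List (String × String)) :=
  ("alpha\nbeta\ngamma", [("target", "bet"), ("content", "-- inserted")])

def Spec_insert_before_py (content : String) (patch_def : List (String × String)) (out : String) : Prop := out = insert_before_py_alt content patch_def
instance (content : String) (patch_def : List (String × String)) (out : String) : Decidable (Spec_insert_before_py content patch_def out) := by unfold Spec_insert_before_py; infer_instance

-- ===== CLAIM (what is proved, stated in full; the proofs are below) =====
def Claim_equal_insert_before_py : Prop := ∀ (content : String) (patch_def : List (String × String)), Dom_insert_before_py content patch_def → Pre_insert_before_py content patch_def → Spec_insert_before_py content patch_def (insert_before_py content patch_def)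

-- ===== LEMMAS AND PROOFS =====

-- char-level images of the two computations
def pvLoopC (t n : List Char) : List (List Char) → List (List Char)
  | [] => []
  | l :: rest => if PySem.Chars.isIn t l then n :: l :: rest else l :: pvLoopC t n rest

def pvBC (t n cs : List Char) : List Char :=
  let idx := PySem.Chars.find cs t
  if idx = -1 ∨ PySem.Chars.isIn ['\n'] t then cs
  else
    let ls := PySem.Chars.rfindFrom cs ['\n'] 0 (some idx) + 1
    PySem.List.slice cs none (some ls) ++ n ++ '\n' ::
      PySem.List.slice cs (some ls) none

-- [c] is a prefix of l.drop k iff the element at k is c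
theorem pv_single_prefix_drop (c : Char) (l : List Char) (k : Nat) :
    [c] <+: l.drop k ↔ l[k]? = some c := by
  have h1 : [c] <+: l.drop k ↔ (l.drop k).head? = some c := by
    cases hd : l.drop k with
    | nil => simp
    | cons a t => simp [List.cons_prefix_cons, eq_comm]
  rw [h1, List.head?_drop]

-- ---------- splitOn machinery ----------

theorem pv_go_acc (sep : List Char) (fuel : Nat) (l cur : List Char) (acc : List (List Char)) :
    PySem.Chars.splitOn.go sep fuel l cur acc =
      acc.reverse ++ PySem.Chars.splitOn.go sep fuel l cur [] := by
  induction fuel generalizing l cur acc with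
  | zero =>
    rw [PySem.Chars.splitOn.go.eq_def]
    conv_rhs => rw [PySem.Chars.splitOn.go.eq_def]
    simp
  | succ f ih =>
    cases l with
    | nil =>
      rw [PySem.Chars.splitOn.go.eq_def]
      conv_rhs => rw [PySem.Chars.splitOn.go.eq_def]
      simp
    | cons c rest =>
      rw [PySem.Chars.splitOn.go.eq_def]
      conv_rhs => rw [PySem.Chars.splitOn.go.eq_def]
      by_cases hp : sep.isPrefixOf (c :: rest) = true
      · simp only [hp, if_true]
        rw [ih, ih (acc := [cur.reverse])]
        simp
      · simp only [hp, Bool.false_eq_true, if_false]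
        rw [ih]


theorem pv_go_noNL (fuel : Nat) (l cur : List Char) (acc : List (List Char))
    (hm : '\n' ∉ l) (hf : l.length ≤ fuel) :
    PySem.Chars.splitOn.go ['\n'] fuel l cur acc = ((cur.reverse ++ l) :: acc).reverse := by
  induction l generalizing fuel cur acc with
  | nil =>
    cases fuel with
    | zero => rw [PySem.Chars.splitOn.go.eq_def]
    | succ f => rw [PySem.Chars.splitOn.go.eq_def]; simp
  | cons c rest ih =>
    cases fuel with
    | zero => simp at hf
    | succ f =>
      rw [PySem.Chars.splitOn.go.eq_def]
      have hc : ('\n' == c) = false := by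
        simp only [beq_eq_false_iff_ne, ne_eq]
        intro h; exact hm (by simp [← h])
      simp only [List.isPrefixOf, hc, Bool.false_and, Bool.false_eq_true, if_false]
      rw [ih f (c :: cur) acc (fun h => hm (List.mem_cons_of_mem c h)) (by simp at hf; omega)]
      simp


theorem pv_go_skip (L rest cur : List Char) (acc : List (List Char)) (fuel : Nat)
    (hm : '\n' ∉ L) (hf : L.length < fuel) :
    PySem.Chars.splitOn.go ['\n'] fuel (L ++ '\n' :: rest) cur acc =
      PySem.Chars.splitOn.go ['\n'] (fuel - (L.length + 1)) rest [] ((cur.reverse ++ L) :: acc) := by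
  induction L generalizing fuel cur acc with
  | nil =>
    cases fuel with
    | zero => omega
    | succ f =>
      rw [PySem.Chars.splitOn.go.eq_def]
      simp [List.isPrefixOf]
  | cons c L' ih =>
    cases fuel with
    | zero => omega
    | succ f =>
      rw [PySem.Chars.splitOn.go.eq_def]
      have hc : ('\n' == c) = false := by
        simp only [beq_eq_false_iff_ne, ne_eq]
        intro h; exact hm (by simp [← h])
      simp only [List.cons_append, List.isPrefixOf, hc, Bool.false_and, Bool.false_eq_true, if_false]
      rw [ih (c :: cur) acc f (fun h => hm (List.mem_cons_of_mem c h)) (by simp at hf; omega)]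
      have harith : f + 1 - ((c :: L').length + 1) = f - (L'.length + 1) := by
        simp
      rw [harith]
      simp


theorem pv_splitOn_noNL (cs : List Char) (hm : '\n' ∉ cs) :
    PySem.Chars.splitOn cs ['\n'] = [cs] := by
  show PySem.Chars.splitOn.go ['\n'] (cs.length + 1) cs [] [] = [cs]
  rw [pv_go_noNL _ _ _ _ hm (by omega)]
  simp


theorem pv_splitOn_cons (L rest : List Char) (hm : '\n' ∉ L) :
    PySem.Chars.splitOn (L ++ '\n' :: rest) ['\n'] = L :: PySem.Chars.splitOn rest ['\n'] := by
  show PySem.Chars.splitOn.go ['\n'] ((L ++ '\n' :: rest).length + 1) (L ++ '\n' :: rest) [] [] = _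
  rw [pv_go_skip _ _ _ _ _ hm (by simp)]
  have harith : (L ++ '\n' :: rest).length + 1 - (L.length + 1) = rest.length + 1 := by
    simp
  rw [harith, pv_go_acc]
  simp
  rfl


-- first-newline decomposition of any string
theorem pv_decomp (cs : List Char) :
    '\n' ∉ cs ∨ ∃ L rest, cs = L ++ '\n' :: rest ∧ '\n' ∉ L := by
  induction cs with
  | nil => left; simp
  | cons c cs' ih =>
    by_cases hc : c = '\n'
    · right; exact ⟨[], cs', by simp [hc], by simp⟩
    · rcases ih with h | ⟨L, rest, heq, hL⟩
      · left
        intro hmem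
        rcases List.mem_cons.mp hmem with h1 | h1
        · exact hc h1.symm
        · exact h h1
      · right
        refine ⟨c :: L, rest, by simp [heq], ?_⟩
        intro hmem
        rcases List.mem_cons.mp hmem with h1 | h1
        · exact hc h1.symm
        · exact hL h1


theorem pv_splitOn_ne_nil (cs : List Char) : PySem.Chars.splitOn cs ['\n'] ≠ [] := by
  rcases pv_decomp cs with h | ⟨L, rest, heq, hL⟩
  · rw [pv_splitOn_noNL cs h]; simp
  · rw [heq, pv_splitOn_cons L rest hL]; simp


theorem pv_join_splitOn (N : Nat) : ∀ cs : List Char, cs.length ≤ N →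
    PySem.Chars.join ['\n'] (PySem.Chars.splitOn cs ['\n']) = cs := by
  induction N with
  | zero =>
    intro cs hlen
    have : cs = [] := List.length_eq_zero_iff.mp (Nat.le_zero.mp hlen)
    subst this
    rw [pv_splitOn_noNL [] (by simp)]
    simp [PySem.Chars.join_singleton]
  | succ N ih =>
    intro cs hlen
    rcases pv_decomp cs with h | ⟨L, rest, heq, hL⟩
    · rw [pv_splitOn_noNL cs h, PySem.Chars.join_singleton]
    · subst heq
      rw [pv_splitOn_cons L rest hL]
      cases hq : PySem.Chars.splitOn rest ['\n'] with
      | nil => exact absurd hq (pv_splitOn_ne_nil rest)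
      | cons q qs =>
        rw [PySem.Chars.join_cons_cons]
        rw [← hq, ih rest (by simp at hlen; omega)]
        simp


-- ---------- find machinery ----------

theorem pv_find_go_shift (sub l : List Char) (k : Nat) :
    PySem.Chars.find.go sub l k =
      if PySem.Chars.find l sub = -1 then -1 else k + PySem.Chars.find l sub := by
  simp only [PySem.Chars.find]
  induction l generalizing k with
  | nil =>
    rw [PySem.Chars.find.go.eq_1, PySem.Chars.find.go.eq_1]
    split_ifs <;> omega
  | cons h tl ih =>
    rw [PySem.Chars.find.go.eq_2, PySem.Chars.find.go.eq_2]
    by_cases hp : sub.isPrefixOf (h :: tl) = true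
    · simp only [hp, if_true]
      split_ifs <;> omega
    · simp only [hp, Bool.false_eq_true, if_false]
      rw [ih (k + 1), ih 1]
      have h0 : -1 ≤ PySem.Chars.find.go sub tl 0 := PySem.Chars.neg_one_le_find tl sub
      split_ifs <;> push_cast <;> omega

-- a target without '\n' that is not a prefix of the newline-free L cannot be a prefix of L ++ '\n' :: M
theorem pv_not_prefix_append (t L M : List Char) (ht : '\n' ∉ t) (hL : '\n' ∉ L)
    (h : ¬ t <+: L) : ¬ t <+: (L ++ '\n' :: M) := by
  intro hpre
  by_cases hlen : t.length ≤ L.length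
  · exact h ((List.isPrefix_append_of_length hlen).mp hpre)
  · rcases hpre with ⟨s, hs⟩
    have h1 : (L ++ '\n' :: M)[L.length]? = some '\n' := by
      rw [List.getElem?_append_right (le_refl _)]
      simp
    have h2 : t[L.length]? = some '\n' := by
      rw [← List.getElem?_append_left (l₂ := s) (by omega), hs]
      exact h1
    exact ht (List.mem_of_getElem? h2)

theorem pv_find_hit (t L M : List Char) (ht : '\n' ∉ t) (hL : '\n' ∉ L) (h : t <:+: L) :
    PySem.Chars.find (L ++ '\n' :: M) t = PySem.Chars.find L t := by
  induction L with
  | nil =>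
    have : t = [] := List.eq_nil_of_infix_nil h
    subst this
    simp [PySem.Chars.find_nil]
  | cons c L' ih =>
    show PySem.Chars.find (c :: (L' ++ '\n' :: M)) t = PySem.Chars.find (c :: L') t
    show PySem.Chars.find.go t (c :: (L' ++ '\n' :: M)) 0 = PySem.Chars.find.go t (c :: L') 0
    rw [PySem.Chars.find.go.eq_2, PySem.Chars.find.go.eq_2]
    by_cases hp : t <+: (c :: L')
    · have hp1 : t.isPrefixOf (c :: L') = true := List.isPrefixOf_iff_prefix.mpr hp
      have hp2 : t.isPrefixOf (c :: (L' ++ '\n' :: M)) = true := by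
        rw [List.isPrefixOf_iff_prefix]
        have : (c :: L') <+: (c :: L') ++ '\n' :: M := List.prefix_append _ _
        exact hp.trans (by simpa using this)
      rw [hp1, hp2]
      simp
    · have hp1 : t.isPrefixOf (c :: L') = false := by
        rw [Bool.eq_false_iff, ne_eq, List.isPrefixOf_iff_prefix]; exact hp
      have hp2 : t.isPrefixOf (c :: (L' ++ '\n' :: M)) = false := by
        rw [Bool.eq_false_iff, ne_eq, List.isPrefixOf_iff_prefix]
        have := pv_not_prefix_append t (c :: L') M ht hL hp
        simpa using this
      rw [hp1, hp2]
      simp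
      have hL' : '\n' ∉ L' := fun hx => hL (List.mem_cons_of_mem c hx)
      have hinf : t <:+: L' := by
        rcases List.infix_cons_iff.mp h with h1 | h1
        · exact absurd h1 hp
        · exact h1
      rw [pv_find_go_shift, pv_find_go_shift, ih hL' hinf]


theorem pv_find_skip (t L M : List Char) (ht : '\n' ∉ t) (hL : '\n' ∉ L) (h : ¬ t <:+: L) :
    PySem.Chars.find (L ++ '\n' :: M) t =
      if PySem.Chars.find M t = -1 then -1 else (L.length : Int) + 1 + PySem.Chars.find M t := by
  induction L with
  | nil =>
    have htne : t ≠ [] := fun he => h (he ▸ List.nil_infix)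
    show PySem.Chars.find.go t ('\n' :: M) 0 = _
    rw [PySem.Chars.find.go.eq_2]
    have hp : t.isPrefixOf ('\n' :: M) = false := by
      rw [Bool.eq_false_iff, ne_eq, List.isPrefixOf_iff_prefix]
      intro hpre
      cases t with
      | nil => exact htne rfl
      | cons a t' =>
        rcases List.cons_prefix_cons.mp hpre with ⟨rfl, -⟩
        exact ht (List.mem_cons_self)
    rw [hp]
    rw [pv_find_go_shift]
    have h0 := PySem.Chars.neg_one_le_find M t
    simp only [Bool.false_eq_true, if_false, List.length_nil, Nat.cast_zero]
    split_ifs <;> push_cast <;> omega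
  | cons c L' ih =>
    have hL' : '\n' ∉ L' := fun hx => hL (List.mem_cons_of_mem c hx)
    have hp : ¬ t <+: (c :: L') := fun hpre => h hpre.isInfix
    have hinf : ¬ t <:+: L' := fun hx => h (List.infix_cons_iff.mpr (Or.inr hx))
    show PySem.Chars.find.go t (c :: (L' ++ '\n' :: M)) 0 = _
    rw [PySem.Chars.find.go.eq_2]
    have hp2 : t.isPrefixOf (c :: (L' ++ '\n' :: M)) = false := by
      rw [Bool.eq_false_iff, ne_eq, List.isPrefixOf_iff_prefix]
      have := pv_not_prefix_append t (c :: L') M ht hL hp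
      simpa using this
    rw [hp2]
    rw [pv_find_go_shift, ih hL' hinf]
    have := PySem.Chars.neg_one_le_find M t
    simp only [Bool.false_eq_true, if_false, List.length_cons]
    split_ifs <;> push_cast <;> omega


-- ---------- rfind machinery ----------

theorem pv_rfgo_zero (s sub : List Char) :
    PySem.Chars.rfind.go s sub 0 = if sub.isPrefixOf s = true then 0 else -1 := rfl

theorem pv_rfgo_succ (s sub : List Char) (j : Nat) :
    PySem.Chars.rfind.go s sub (j + 1) =
      if sub.isPrefixOf (s.drop (j + 1)) = true then ((j : Int) + 1) else PySem.Chars.rfind.go s sub j := rfl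

theorem pv_rfgo_ge (s sub : List Char) (j : Nat) : -1 ≤ PySem.Chars.rfind.go s sub j := by
  induction j with
  | zero => rw [pv_rfgo_zero]; split_ifs <;> omega
  | succ j ih => rw [pv_rfgo_succ]; split_ifs <;> [omega; exact ih]

theorem pv_rfind_ge (s sub : List Char) : -1 ≤ PySem.Chars.rfind s sub :=
  pv_rfgo_ge s sub s.length

theorem pv_rfind_go_not_mem (c : Char) (s : List Char) (hm : c ∉ s) (j : Nat) :
    PySem.Chars.rfind.go s [c] j = -1 := by
  induction j with
  | zero =>
    rw [pv_rfgo_zero]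
    have hb : [c].isPrefixOf s = false := by
      rw [Bool.eq_false_iff, ne_eq, List.isPrefixOf_iff_prefix]
      intro hpre
      have h0 := (pv_single_prefix_drop c s 0).mp (by simpa using hpre)
      exact hm (List.mem_of_getElem? h0)
    rw [hb]
    simp
  | succ j ih =>
    rw [pv_rfgo_succ]
    have hb : [c].isPrefixOf (s.drop (j + 1)) = false := by
      rw [Bool.eq_false_iff, ne_eq, List.isPrefixOf_iff_prefix, pv_single_prefix_drop]
      intro hget
      exact hm (List.mem_of_getElem? hget)
    rw [hb]
    simpa using ih

theorem pv_rfind_not_mem (c : Char) (s : List Char) (hm : c ∉ s) :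
    PySem.Chars.rfind s [c] = -1 := by
  show PySem.Chars.rfind.go s [c] s.length = -1
  exact pv_rfind_go_not_mem c s hm s.length

theorem pv_rfind_go_append (c : Char) (L M : List Char) (hm : c ∉ L) (i : Nat) :
    PySem.Chars.rfind.go (L ++ c :: M) [c] (L.length + 1 + i) =
      (L.length : Int) + 1 +
        (if PySem.Chars.rfind.go M [c] i = -1 then -1 else PySem.Chars.rfind.go M [c] i) := by
  have hL0 : PySem.Chars.rfind.go (L ++ c :: M) [c] L.length = (L.length : Int) := by
    cases hL2 : L.length with
    | zero =>
      have : L = [] := List.length_eq_zero_iff.mp hL2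
      subst this
      rw [pv_rfgo_zero]
      simp [List.isPrefixOf]
    | succ j =>
      rw [pv_rfgo_succ]
      have hdrop2 : (L ++ c :: M).drop (j + 1) = c :: M := by
        rw [← hL2]
        exact List.drop_left
      rw [hdrop2]
      simp [List.isPrefixOf, hL2]
  induction i with
  | zero =>
    have h00 : L.length + 1 + 0 = L.length + 1 := by omega
    rw [h00, pv_rfgo_succ]
    have hdrop : (L ++ c :: M).drop (L.length + 1) = M := by
      have := List.drop_length_add_append (l₁ := L) (l₂ := c :: M) (i := 1)
      simpa using this
    rw [hdrop, pv_rfgo_zero]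
    by_cases hp : [c].isPrefixOf M = true
    · simp [hp]
    · simp only [Bool.eq_false_iff, ne_eq] at hp
      simp [hp, hL0]
  | succ i ih =>
    have harith : L.length + 1 + (i + 1) = (L.length + 1 + i) + 1 := by omega
    rw [harith, pv_rfgo_succ]
    have hdrop : (L ++ c :: M).drop (L.length + 1 + i + 1) = M.drop (i + 1) := by
      have h2 : L.length + 1 + i + 1 = L.length + (i + 2) := by omega
      rw [h2, List.drop_length_add_append]
      rfl
    rw [hdrop]
    conv_rhs => rw [pv_rfgo_succ]
    by_cases hp : [c].isPrefixOf (M.drop (i + 1)) = true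
    · simp only [hp, if_true]
      have : ((L.length + 1 + i : Nat) : Int) + 1 ≠ -1 := by push_cast; omega
      rw [if_neg (by push_cast; omega)]
      push_cast
      omega
    · simp only [hp, Bool.false_eq_true, if_false]
      rw [ih]

theorem pv_rfind_append (c : Char) (L M : List Char) (hm : c ∉ L) :
    PySem.Chars.rfind (L ++ c :: M) [c] =
      (L.length : Int) + 1 + (if PySem.Chars.rfind M [c] = -1 then -1 else PySem.Chars.rfind M [c]) := by
  show PySem.Chars.rfind.go (L ++ c :: M) [c] (L ++ c :: M).length = _
  have hlen : (L ++ c :: M).length = L.length + 1 + M.length := by simp; omega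
  rw [hlen, pv_rfind_go_append c L M hm M.length]
  rfl

theorem pv_rfindFrom_eq (s sub : List Char) (e : Int) (h0 : 0 ≤ e) (hle : e ≤ s.length) :
    PySem.Chars.rfindFrom s sub 0 (some e) =
      (if PySem.Chars.rfind (s.take e.toNat) sub = -1 then -1
       else PySem.Chars.rfind (s.take e.toNat) sub) := by
  simp only [PySem.Chars.rfindFrom]
  have h1 : ¬ ((s.length : Int) < e) := by omega
  have h2 : ¬ (e < 0) := by omega
  simp only [h1, if_false, h2, if_true]
  norm_num
  intro hx
  exact absurd hx h2


-- ---------- main char-level equivalence ----------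

theorem pv_main_noNL (t n cs : List Char) (hm : '\n' ∉ cs) :
    PySem.Chars.join ['\n'] (pvLoopC t n (PySem.Chars.splitOn cs ['\n'])) = pvBC t n cs := by
  rw [pv_splitOn_noNL cs hm]
  by_cases hIn : PySem.Chars.isIn t cs = true
  · have hinf : t <:+: cs := (PySem.Chars.isIn_iff_infix t cs).mp hIn
    have htn : '\n' ∉ t := fun hx => hm (hinf.subset hx)
    have hni : PySem.Chars.isIn ['\n'] t = false :=
      (PySem.Chars.isIn_eq_false_iff ['\n'] t).mpr (fun hx => htn ((List.singleton_infix_iff _ _).mp hx))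
    have hfind0 : 0 ≤ PySem.Chars.find cs t := (PySem.Chars.find_nonneg_iff cs t).mpr hinf
    have hfindle : PySem.Chars.find cs t ≤ (cs.length : Int) := PySem.Chars.find_le_length cs t
    simp only [pvLoopC, hIn, if_true]
    rw [PySem.Chars.join_cons_cons, PySem.Chars.join_singleton]
    simp only [pvBC]
    rw [if_neg (by push_neg; exact ⟨by omega, by simp [hni]⟩)]
    rw [pv_rfindFrom_eq cs ['\n'] _ hfind0 hfindle]
    have hrf : PySem.Chars.rfind (cs.take (PySem.Chars.find cs t).toNat) ['\n'] = -1 :=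
      pv_rfind_not_mem _ _ (fun hx => hm (List.take_subset _ _ hx))
    rw [hrf]
    simp [PySem.List.slice_to cs (by norm_num : (0:Int) ≤ 0), PySem.List.slice_from cs (by norm_num : (0:Int) ≤ 0)]
  · have hninf : ¬ t <:+: cs :=
      (PySem.Chars.isIn_eq_false_iff t cs).mp (Bool.eq_false_iff.mpr hIn)
    have hfneg : PySem.Chars.find cs t = -1 := (PySem.Chars.find_eq_neg_one_iff cs t).mpr hninf
    simp only [pvLoopC, hIn, Bool.false_eq_true, if_false]
    rw [PySem.Chars.join_singleton]
    simp only [pvBC]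
    rw [if_pos (Or.inl hfneg)]


theorem pv_loopC_ne_nil (t n : List Char) (xs : List (List Char)) (h : xs ≠ []) :
    pvLoopC t n xs ≠ [] := by
  cases xs with
  | nil => exact absurd rfl h
  | cons a l => unfold pvLoopC; split <;> simp

theorem pv_main (t n : List Char) (N : Nat) : ∀ cs : List Char, cs.length ≤ N →
    PySem.Chars.join ['\n'] (pvLoopC t n (PySem.Chars.splitOn cs ['\n'])) = pvBC t n cs := by
  induction N with
  | zero =>
    intro cs hlen
    have : cs = [] := List.length_eq_zero_iff.mp (Nat.le_zero.mp hlen)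
    subst this
    exact pv_main_noNL t n [] (by simp)
  | succ N ih =>
    intro cs hlen
    rcases pv_decomp cs with hnl | ⟨L, rest, heq, hL⟩
    · exact pv_main_noNL t n cs hnl
    subst heq
    have hrlen : rest.length ≤ N := by simp at hlen; omega
    rw [pv_splitOn_cons L rest hL]
    by_cases hIn : PySem.Chars.isIn t L = true
    · -- target occurs in the FIRST line: insert at the very front
      have hinf : t <:+: L := (PySem.Chars.isIn_iff_infix t L).mp hIn
      have htn : '\n' ∉ t := fun hx => hL (hinf.subset hx)
      have hni : PySem.Chars.isIn ['\n'] t = false :=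
        (PySem.Chars.isIn_eq_false_iff ['\n'] t).mpr (fun hx => htn ((List.singleton_infix_iff _ _).mp hx))
      have hfL0 : 0 ≤ PySem.Chars.find L t := (PySem.Chars.find_nonneg_iff L t).mpr hinf
      have hfLle : PySem.Chars.find L t ≤ (L.length : Int) := PySem.Chars.find_le_length L t
      have hidx : PySem.Chars.find (L ++ '\n' :: rest) t = PySem.Chars.find L t :=
        pv_find_hit t L rest htn hL hinf
      simp only [pvLoopC, hIn, if_true]
      rw [PySem.Chars.join_cons_cons]
      rw [← pv_splitOn_cons L rest hL,
        pv_join_splitOn (L ++ '\n' :: rest).length (L ++ '\n' :: rest) le_rfl]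
      simp only [pvBC, hidx]
      rw [if_neg (by push_neg; exact ⟨by omega, by simp [hni]⟩)]
      rw [pv_rfindFrom_eq _ ['\n'] _ hfL0 (by simp; omega)]
      have htake : (L ++ '\n' :: rest).take (PySem.Chars.find L t).toNat
          = L.take (PySem.Chars.find L t).toNat :=
        List.take_append_of_le_length (by omega)
      have hrf : PySem.Chars.rfind ((L ++ '\n' :: rest).take (PySem.Chars.find L t).toNat) ['\n'] = -1 := by
        rw [htake]
        exact pv_rfind_not_mem _ _ (fun hx => hL (List.take_subset _ _ hx))
      rw [hrf]
      simp [PySem.List.slice_to _ (by norm_num : (0:Int) ≤ 0), PySem.List.slice_from _ (by norm_num : (0:Int) ≤ 0)]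
    · -- target misses the first line
      have hninfL : ¬ t <:+: L :=
        (PySem.Chars.isIn_eq_false_iff t L).mp (Bool.eq_false_iff.mpr hIn)
      simp only [pvLoopC, hIn, Bool.false_eq_true, if_false]
      cases hq : pvLoopC t n (PySem.Chars.splitOn rest ['\n']) with
      | nil => exact absurd hq (pv_loopC_ne_nil t n _ (pv_splitOn_ne_nil rest))
      | cons q qs =>
        rw [PySem.Chars.join_cons_cons, ← hq, ih rest hrlen]
        by_cases hnt : PySem.Chars.isIn ['\n'] t = true
        · -- target spans a newline: never found in any line; B leaves content unchanged
          have hB1 : pvBC t n rest = rest := by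
            simp only [pvBC]
            rw [if_pos (Or.inr hnt)]
          have hB2 : pvBC t n (L ++ '\n' :: rest) = L ++ '\n' :: rest := by
            simp only [pvBC]
            rw [if_pos (Or.inr hnt)]
          rw [hB1, hB2]
          simp
        · have htn : '\n' ∉ t := fun hx =>
            hnt ((PySem.Chars.isIn_iff_infix _ _).mpr ((List.singleton_infix_iff _ _).mpr hx))
          have hfs := pv_find_skip t L rest htn hL hninfL
          by_cases hfr : PySem.Chars.find rest t = -1
          · have hB1 : pvBC t n rest = rest := by
              simp only [pvBC]
              rw [if_pos (Or.inl hfr)]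
            have hB2 : pvBC t n (L ++ '\n' :: rest) = L ++ '\n' :: rest := by
              simp only [pvBC]
              rw [if_pos (Or.inl (by rw [hfs, if_pos hfr]))]
            rw [hB1, hB2]
            simp
          · -- target first occurs in rest
            have hj0 : 0 ≤ PySem.Chars.find rest t := by
              have := PySem.Chars.neg_one_le_find rest t
              omega
            have hjle : PySem.Chars.find rest t ≤ (rest.length : Int) := PySem.Chars.find_le_length rest t
            have hidx : PySem.Chars.find (L ++ '\n' :: rest) t
                = (L.length : Int) + 1 + PySem.Chars.find rest t := by
              rw [hfs, if_neg hfr]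
            set j := PySem.Chars.find rest t with hjdef
            set rM := PySem.Chars.rfind (rest.take j.toNat) ['\n'] with hrMdef
            set ls : Int := (if rM = -1 then -1 else rM) + 1 with hlsdef
            have hrMge : -1 ≤ rM := pv_rfind_ge _ _
            have hls0 : 0 ≤ ls := by
              rw [hlsdef]
              split_ifs <;> omega
            have hBrest : pvBC t n rest =
                rest.take ls.toNat ++ n ++ '\n' :: rest.drop ls.toNat := by
              simp only [pvBC]
              rw [if_neg (by push_neg; exact ⟨hfr, fun hx => hnt hx⟩)]
              rw [pv_rfindFrom_eq rest ['\n'] j hj0 hjle, ← hrMdef, ← hlsdef]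
              rw [PySem.List.slice_to rest hls0, PySem.List.slice_from rest hls0]
            -- now compute B on the whole string
            have hBcs : pvBC t n (L ++ '\n' :: rest) =
                L ++ '\n' :: (rest.take ls.toNat ++ n ++ '\n' :: rest.drop ls.toNat) := by
              simp only [pvBC, hidx]
              rw [if_neg (by push_neg; exact ⟨by omega, fun hx => hnt hx⟩)]
              rw [pv_rfindFrom_eq _ ['\n'] _ (by omega) (by simp; omega)]
              have htoNat : ((L.length : Int) + 1 + j).toNat = L.length + (j.toNat + 1) := by omega
              have htake1 : (L ++ '\n' :: rest).take ((L.length : Int) + 1 + j).toNat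
                  = L ++ '\n' :: rest.take j.toNat := by
                rw [htoNat]
                rw [show (L ++ '\n' :: rest) = L ++ ('\n' :: rest) from rfl, List.take_length_add_append]
                rfl
              rw [htake1]
              rw [pv_rfind_append '\n' L (rest.take j.toNat) hL, ← hrMdef]
              set rM' : Int := if rM = -1 then -1 else rM with hrM'def
              have hrM'0 : -1 ≤ rM' := by rw [hrM'def]; split_ifs <;> omega
              rw [if_neg (by omega)]
              have hls_cs : (L.length : Int) + 1 + rM' + 1 = (L.length : Int) + 1 + ls := by
                rw [hlsdef]; ring
              rw [hls_cs]
              have h0ls : (0:Int) ≤ (L.length : Int) + 1 + ls := by omega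
              rw [PySem.List.slice_to _ h0ls, PySem.List.slice_from _ h0ls]
              have htoNat2 : ((L.length : Int) + 1 + ls).toNat = L.length + (ls.toNat + 1) := by omega
              rw [htoNat2]
              rw [show (L ++ '\n' :: rest) = L ++ ('\n' :: rest) from rfl,
                List.take_length_add_append, List.drop_length_add_append]
              simp
            rw [hBrest, hBcs]
            simp


-- ---------- string-level bridge ----------

theorem pv_loop_map (target new_content : String) (xss : List (List Char)) :
    (pvInsLoop target new_content (xss.map String.ofList)).map String.toList
      = pvLoopC target.toList new_content.toList xss := by
  induction xss with
  | nil => simp [pvInsLoop, pvLoopC]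
  | cons x xs ih =>
    simp only [List.map_cons, pvInsLoop, pvLoopC]
    have hb : PySem.Str.isIn target (String.ofList x) = PySem.Chars.isIn target.toList x := by
      simp [PySem.Str.isIn]
    rw [hb]
    split_ifs
    · simp [Function.comp_def]
    · simp [ih]

-- ===== VERDICT (by name: the statement is the Claim_ definition above) =====
theorem insert_before_py_spec : Claim_equal_insert_before_py := by
  unfold Claim_equal_insert_before_py
  intro content patch_def _hdom hpre
  unfold Spec_insert_before_py
  obtain ⟨h1, h2⟩ := hpre
  cases hT : (PySem.Dict.ofList patch_def).get? "target" with
  | none => rw [hT] at h1; simp at h1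
  | some target =>
  cases hC : (PySem.Dict.ofList patch_def).get? "content" with
  | none => rw [hC] at h2; simp at h2
  | some new_content =>
  have hsep : ("\n" : String).toList = ['\n'] := rfl
  have hA : insert_before_py content patch_def
      = String.ofList (PySem.Chars.join ['\n']
          (pvLoopC target.toList new_content.toList (PySem.Chars.splitOn content.toList ['\n']))) := by
    simp only [insert_before_py, hT, hC]
    have hsplit : PySem.Str.split? content "\n"
        = some ((PySem.Chars.splitOn content.toList ['\n']).map String.ofList) := by
      simp [PySem.Str.split?, PySem.Chars.split?, hsep]
    rw [hsplit]
    simp only [Option.getD_some]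
    simp only [PySem.Str.join, hsep]
    rw [pv_loop_map]
  have hB : insert_before_py_alt content patch_def
      = String.ofList (pvBC target.toList new_content.toList content.toList) := by
    simp only [insert_before_py_alt, hT, hC, pvBC]
    simp only [PySem.Str.find_eq, PySem.Str.rfindFrom_eq, PySem.Str.isIn, hsep]
    split_ifs with hcond
    · rw [String.ofList_toList]
    · rfl
  rw [hA, hB, pv_main target.toList new_content.toList content.toList.length content.toList le_rfl]
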